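-- pv_equiv track=rewrite | github.com/omarathon/rl-multi-agent-car-parking | q-learning/iql_run.py | compute_permutation_index_lookup_table
-- ===== SOURCE A (Python) =====
-- from typing import Dict, List, Tuple
--
-- def hash_int_tuple(tuple: Tuple) -> str:
--     return ",".join(str(int(x)) for x in tuple)
--
-- def permutations_range_set(ranges: Tuple[int]) -> List[Tuple[int]]:
--       if len(ranges) == 0: return [()]
--       head = ranges[0]
--       tail = tuple([ranges[i] for i in range(1, len(ranges))])
--       permuations_tail = permutations_range_set(tail)
--       result = []
--       for permutation_tail in permuations_tail:
--         for i in range(0, head):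
--           result.append((i, *permutation_tail))
--       return result
--
-- def compute_permutation_index_lookup_table(ranges: Tuple[int]) -> Dict[str, int]:
--     lookup_table: Dict[str, int] = {} # hash to index
--     permutations = permutations_range_set(ranges)
--     i = 0
--     for permutation in permutations:
--         key = hash_int_tuple(permutation)
--         lookup_table[key] = i
--         i += 1
--     return lookup_table
-- ===== SOURCE B (Python) =====
-- from typing import Dict, List, Tuple
--
-- def compute_permutation_index_lookup_table(ranges: Tuple[int]) -> Dict[str, int]:
--     # Mixed-radix decode: index -> tuple, first coordinate least significant.
--     total = 1
--     prefix = []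
--     for r in ranges:
--         prefix.append(total)
--         total *= max(r, 0)
--     lookup_table: Dict[str, int] = {}
--     for i in range(total):
--         key = ",".join(str((i // p) % r) for p, r in zip(prefix, ranges))
--         lookup_table[key] = i
--     return lookup_table
-- ===== Notes on version B (the rewrite author's own statement) =====
-- stated objective: alternative
-- what changed: Replaces the recursive cross-product construction of all permutation tuples with a direct arithmetic mixed-radix decode: each index i in range(prod(ranges)) is turned into its digit tuple via prefix products, so no intermediate tuple lists are materialized.
import Mathlib
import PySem

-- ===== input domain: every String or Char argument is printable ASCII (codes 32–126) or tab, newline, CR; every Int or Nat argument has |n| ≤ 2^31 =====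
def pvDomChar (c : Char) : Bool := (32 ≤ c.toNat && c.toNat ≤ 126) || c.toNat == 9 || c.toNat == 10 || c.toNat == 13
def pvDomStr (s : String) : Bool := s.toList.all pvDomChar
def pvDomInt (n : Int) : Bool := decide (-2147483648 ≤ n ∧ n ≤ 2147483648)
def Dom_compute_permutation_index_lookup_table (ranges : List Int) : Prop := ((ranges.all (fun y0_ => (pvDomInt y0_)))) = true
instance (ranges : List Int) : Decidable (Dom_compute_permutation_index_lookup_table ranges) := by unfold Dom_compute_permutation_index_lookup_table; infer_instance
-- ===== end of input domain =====

-- B replaces A's recursive cross-product construction by a direct mixed-radix index->digits decode, avoiding the intermediate tuple lists (alternative algorithm, same output dict).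

-- ===== PORT A =====
def hash_int_tuple (t : List Int) : String :=
  PySem.Str.join "," (t.map PySem.Int.toStr)

def permutations_range_set (ranges : List Int) : List (List Int) :=
  match ranges with
  | [] => [[]]
  | head :: tail =>
    let permutations_tail := permutations_range_set tail
    permutations_tail.foldl
      (fun result permutation_tail =>
        (PySem.List.pyRange 0 head 1).foldl
          (fun result i => result ++ [i :: permutation_tail]) result)
      []

def compute_permutation_index_lookup_table (ranges : List Int) : List (String × Int) :=
  let permutations := permutations_range_set ranges
  let st := permutations.foldl
    (fun (st : PySem.Dict String Int × Int) permutation =>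
      (st.1.insert (hash_int_tuple permutation) st.2, st.2 + 1))
    (PySem.Dict.empty, 0)
  st.1.items

-- ===== PORT B =====
def compute_permutation_index_lookup_table_alt (ranges : List Int) : List (String × Int) :=
  let tp := ranges.foldl
    (fun (st : Int × List Int) r => (st.1 * max r 0, st.2 ++ [st.1])) (1, ([] : List Int))
  let total := tp.1
  let prefixes := tp.2
  ((PySem.List.pyRange 0 total 1).foldl
    (fun (d : PySem.Dict String Int) i =>
      d.insert
        (PySem.Str.join ","
          ((prefixes.zip ranges).map
            (fun pr => PySem.Int.toStr (PySem.Int.mod (PySem.Int.floordiv i pr.1) pr.2))))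
        i)
    PySem.Dict.empty).items

-- ===== PRECONDITION & SPEC =====
def Spec_compute_permutation_index_lookup_table (ranges : List Int) (out : List (String × Int)) : Prop := out = compute_permutation_index_lookup_table_alt ranges
instance (ranges : List Int) (out : List (String × Int)) : Decidable (Spec_compute_permutation_index_lookup_table ranges out) := by unfold Spec_compute_permutation_index_lookup_table; infer_instance

-- ===== CLAIM (what is proved, stated in full; the proofs are below) =====
def Claim_equal_compute_permutation_index_lookup_table : Prop := ∀ (ranges : List Int), Dom_compute_permutation_index_lookup_table ranges → Spec_compute_permutation_index_lookup_table ranges (compute_permutation_index_lookup_table ranges)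

-- ===== LEMMAS AND PROOFS =====

-- product of the clamped ranges, as a Nat
def pvTotN : List Int → Nat
  | [] => 1
  | r :: t => r.toNat * pvTotN t

-- prefix products of the clamped ranges
def pvPref : List Int → List Int
  | [] => []
  | r :: t => 1 :: (pvPref t).map (fun p => ((r.toNat : Int)) * p)

-- mixed-radix decode, first coordinate least significant
def pvDecode : List Int → Int → List Int
  | [], _ => []
  | r :: t, i => PySem.Int.mod i r :: pvDecode t (PySem.Int.floordiv i r)

lemma pvScan (rs : List Int) : ∀ (a : Int) (acc : List Int),
    rs.foldl (fun (st : Int × List Int) r => (st.1 * max r 0, st.2 ++ [st.1])) (a, acc)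
      = (a * (pvTotN rs : Int), acc ++ (pvPref rs).map (fun p => a * p)) := by
  induction rs with
  | nil => intro a acc; simp [pvTotN, pvPref]
  | cons r t ih =>
    intro a acc
    simp only [List.foldl_cons, ih, pvTotN, pvPref, List.map_cons, List.map_map]
    rw [Prod.mk.injEq]
    refine ⟨by push_cast; rw [Int.toNat_eq_max]; ring, ?_⟩
    rw [mul_one, List.append_assoc, List.singleton_append]
    congr 2
    apply List.map_congr_left
    intro p _
    simp only [Function.comp_apply]
    rw [Int.toNat_eq_max]; ring

lemma pvPref_pos (rs : List Int) (hpos : ∀ r ∈ rs, 0 < r) :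
    ∀ p ∈ pvPref rs, 0 < p := by
  induction rs with
  | nil => simp [pvPref]
  | cons r t ih =>
    intro p hp
    simp only [pvPref, List.mem_cons, List.mem_map] at hp
    rcases hp with h | ⟨q, hq, rfl⟩
    · omega
    · have hr : 0 < r := hpos r (by simp)
      have hq' : 0 < q := ih (fun x hx => hpos x (List.mem_cons_of_mem _ hx)) q hq
      have : (0:Int) < (r.toNat : Int) := by omega
      positivity

lemma pvDigits (rs : List Int) : ∀ (i : Int), 0 ≤ i → (∀ r ∈ rs, 0 < r) →
    ((pvPref rs).zip rs).map
        (fun pr => PySem.Int.mod (PySem.Int.floordiv i pr.1) pr.2)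
      = pvDecode rs i := by
  induction rs with
  | nil => intro i _ _; simp [pvPref, pvDecode]
  | cons r t ih =>
    intro i hi hpos
    have hr : 0 < r := hpos r (by simp)
    simp only [pvPref, pvDecode, List.zip_cons_cons, List.map_cons, List.zip_map_left,
      List.map_map]
    congr 1
    · rw [PySem.Int.floordiv_eq_ediv_of_pos (by norm_num), Int.ediv_one]
    · rw [← ih (PySem.Int.floordiv i r)
        (by rw [PySem.Int.floordiv_eq_ediv_of_pos hr]; exact Int.ediv_nonneg hi (le_of_lt hr))
        (fun x hx => hpos x (List.mem_cons_of_mem _ hx))]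
      apply List.map_congr_left
      rintro ⟨p, r'⟩ hmem
      have hp : p ∈ pvPref t := (List.of_mem_zip hmem).1
      have hppos : 0 < p := pvPref_pos t (fun x hx => hpos x (List.mem_cons_of_mem _ hx)) p hp
      simp only [Function.comp_apply, Prod.map_apply, id_eq]
      congr 1
      -- floordiv i (r * p) = floordiv (floordiv i r) p, all positive
      have hrn : ((r.toNat : Int)) = r := by omega
      rw [hrn, PySem.Int.floordiv_eq_ediv_of_pos (by positivity),
        PySem.Int.floordiv_eq_ediv_of_pos hr, PySem.Int.floordiv_eq_ediv_of_pos hppos]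
      rw [Int.ediv_ediv_of_nonneg (le_of_lt hr)]

lemma pvRangeMul (a b : Nat) :
    List.range (a * b) = (List.range b).flatMap (fun j => (List.range a).map (fun i => j * a + i)) := by
  induction b with
  | zero => simp
  | succ b ih =>
    rw [Nat.mul_succ, List.range_add, ih, List.range_succ, List.flatMap_append]
    simp [mul_comm]

lemma pvTotN_zero (rs : List Int) (h : ∃ r ∈ rs, r ≤ 0) : pvTotN rs = 0 := by
  induction rs with
  | nil => simp at h
  | cons r t ih =>
    rcases h with ⟨x, hx, hle⟩
    simp only [List.mem_cons] at hx
    rcases hx with rfl | hx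
    · simp [pvTotN, Int.toNat_of_nonpos hle]
    · simp [pvTotN, ih ⟨x, hx, hle⟩]

lemma pvCons (r : Int) (t : List Int) (j : Nat) :
    (PySem.List.pyRange 0 r 1).map (fun i : Int => i :: pvDecode t (j : Int))
      = (List.range r.toNat).map (fun i : Nat => pvDecode (r :: t) (Int.ofNat (j * r.toNat + i))) := by
  rw [PySem.List.pyRange_one, List.map_map]
  simp only [sub_zero, Int.ofNat_eq_natCast]
  apply List.map_congr_left
  intro i hi
  have hia : i < r.toNat := List.mem_range.mp hi
  obtain ⟨a, rfl⟩ : ∃ a : Nat, r = (a : Int) := ⟨r.toNat, by omega⟩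
  simp only [Int.toNat_natCast] at hia ⊢
  simp only [Function.comp_apply, zero_add, pvDecode]
  rw [show j * a + i = a * j + i from by ring,
    PySem.Int.mod_natCast, PySem.Int.floordiv_natCast, Nat.mul_add_mod,
    Nat.mul_add_div (by omega), Nat.mod_eq_of_lt hia, Nat.div_eq_of_lt hia, Nat.add_zero]

lemma pvPermSet (rs : List Int) :
    permutations_range_set rs = (List.range (pvTotN rs)).map (fun k : Nat => pvDecode rs (Int.ofNat k)) := by
  induction rs with
  | nil => simp [permutations_range_set, pvTotN, pvDecode]
  | cons r t ih =>
    rw [permutations_range_set]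
    rw [PySem.List.foldl_congr_mem _ _
        (fun result tp => result ++ (PySem.List.pyRange 0 r 1).map (fun i => i :: tp)) _
        (fun acc tp _ => PySem.List.foldl_append_singleton_eq_map _ _ _)]
    rw [PySem.List.foldl_append_eq_flatMap, List.nil_append, ih, List.flatMap_map]
    rw [show pvTotN (r :: t) = r.toNat * pvTotN t from rfl, pvRangeMul, List.map_flatMap]
    simp only [List.map_map]
    exact congrArg (fun F => List.flatMap F (List.range (pvTotN t)))
      (funext fun j => (pvCons r t j).trans (by simp [Function.comp]))

lemma pvFoldA (g : Nat → List Int) (m : Nat) :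
    (List.range m).foldl
        (fun (st : PySem.Dict String Int × Int) (y : Nat) =>
          (st.1.insert (hash_int_tuple (g y)) st.2, st.2 + 1))
        (PySem.Dict.empty, 0)
      = ((List.range m).foldl
          (fun (d : PySem.Dict String Int) k => d.insert (hash_int_tuple (g k)) ((k : Nat) : Int))
          PySem.Dict.empty, (m : Int)) := by
  induction m with
  | zero => simp
  | succ m ih =>
    rw [List.range_succ, List.foldl_append, List.foldl_append, ih]
    simp only [List.foldl_cons, List.foldl_nil]
    push_cast
    rfl

lemma pvKey (rs : List Int) (i : Int) (hi : 0 ≤ i) (hpos : ∀ r ∈ rs, 0 < r) :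
    PySem.Str.join ","
        (((pvPref rs).zip rs).map
          (fun pr => PySem.Int.toStr (PySem.Int.mod (PySem.Int.floordiv i pr.1) pr.2)))
      = hash_int_tuple (pvDecode rs i) := by
  unfold hash_int_tuple
  rw [← pvDigits rs i hi hpos, List.map_map]
  rfl

-- ===== VERDICT (by name: the statement is the Claim_ definition above) =====
theorem compute_permutation_index_lookup_table_spec : Claim_equal_compute_permutation_index_lookup_table := by
  intro ranges _
  unfold Spec_compute_permutation_index_lookup_table
  simp only [compute_permutation_index_lookup_table, compute_permutation_index_lookup_table_alt,
    pvScan, one_mul, List.map_id', List.nil_append, PySem.List.pyRange_zero_natCast,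
    List.foldl_map, pvPermSet]
  rw [pvFoldA]
  by_cases hpos : ∀ r ∈ ranges, 0 < r
  · dsimp only
    refine congrArg PySem.Dict.items ?_
    apply PySem.List.foldl_congr_mem
    intro d k hk
    simp only [Int.ofNat_eq_natCast]
    rw [pvKey ranges (k : Int) (Int.natCast_nonneg k) hpos]
  · have h0 : pvTotN ranges = 0 := pvTotN_zero ranges (by simpa using hpos)
    rw [h0]
    simp
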